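-- pv_equiv track=rewrite | github.com/0XMagic/BluTape | pop_importer.py | fmt_mid_comments
-- ===== SOURCE A (Python) =====
-- def fmt_mid_comments(s_l: list):
-- 	for n in range(len(s_l)):
-- 		if "//" in s_l[n]:
-- 			ns = s_l[n]
-- 			s_l[n] = ""
-- 			in_quote = False
-- 			prev = ""
-- 			for i in range(len(ns)):
-- 				cur = ns[0]
-- 				ns = ns[1:]
-- 				if cur == "/" and prev == "/" and not in_quote:
-- 					s_l[n] = s_l[n][:-1]
-- 					break
-- 				if cur == "\"" or cur == "\'":
-- 					in_quote = not in_quote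
-- 				prev = cur
-- 				s_l[n] += cur
-- 	return s_l
-- ===== SOURCE B (Python) =====
-- # B: cut each line at the first "//" preceded by an even number of quote characters
-- # (A toggles one flag for both quote kinds, so in-quote state = parity of the quote count).
-- # Like A, mutates s_l in place and returns it.
-- def fmt_mid_comments(s_l: list):
-- 	def cut(s):
-- 		pos = 0
-- 		while True:
-- 			j = s.find("//", pos)
-- 			if j == -1:
-- 				return s
-- 			if (s.count("\"", 0, j) + s.count("\'", 0, j)) % 2 == 0:
-- 				return s[:j]
-- 			pos = j + 1
-- 	for n, s in enumerate(s_l):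
-- 		s_l[n] = cut(s)
-- 	return s_l
-- ===== Notes on version B (the rewrite author's own statement) =====
-- stated objective: alternative
-- what changed: Replaces A's char-by-char string-rebuilding state machine (repeated one-char slicing/concatenation with prev-char and in-quote flags) with C-level find/count jumps: cut each line at the first '//' occurrence preceded by an even number of quote characters.
import Mathlib
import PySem

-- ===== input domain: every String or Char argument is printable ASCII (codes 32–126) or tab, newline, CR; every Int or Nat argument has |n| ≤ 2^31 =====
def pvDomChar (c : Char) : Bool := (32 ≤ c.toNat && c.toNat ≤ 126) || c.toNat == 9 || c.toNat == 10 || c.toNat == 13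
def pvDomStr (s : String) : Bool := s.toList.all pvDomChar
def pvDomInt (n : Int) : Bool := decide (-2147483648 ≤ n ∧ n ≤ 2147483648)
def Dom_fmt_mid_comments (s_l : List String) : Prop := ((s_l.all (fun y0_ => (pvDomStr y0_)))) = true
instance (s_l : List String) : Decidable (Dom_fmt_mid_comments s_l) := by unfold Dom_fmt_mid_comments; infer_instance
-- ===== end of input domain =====

-- B replaces A's char-by-char string-rebuilding state machine with find/count jumps:
-- cut each line at the first "//" preceded by an even number of quote characters
-- (objective: alternative).  Both A and the Python B mutate s_l in place; the
-- equivalence proved here is about the return value.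

-- ===== PORT A =====
-- A's inner loop: consumes ns one char at a time, rebuilding acc; prev is "" or one char.
def pvALine : List Char → List Char → Bool → List Char → List Char
  | [], acc, _, _ => acc
  | cur :: rest, acc, inq, prev =>
      if cur = '/' ∧ prev = ['/'] ∧ inq = false then acc.dropLast
      else pvALine rest (acc ++ [cur])
            (if cur = '"' ∨ cur = '\'' then !inq else inq) [cur]

def fmt_mid_comments (s_l : List String) : List String :=
  s_l.map (fun s =>
    if PySem.Str.isIn "//" s then String.ofList (pvALine s.toList [] false []) else s)

-- ===== PORT B =====
-- the two s.count(q, 0, j) calls of Source B, ported by hand as character counts on s[:j] (exact)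
def pvQuoteCount (cs : List Char) : Nat := cs.count '"' + cs.count '\''

-- B's while loop over pos = successive s.find("//", pos) results; the fuel argument is
-- only a totality guard (pos grows strictly and stays ≤ |s|, so |s| + 1 steps suffice).
def pvBCut (s : List Char) (pos : Nat) : Nat → List Char
  | 0 => s
  | fuel + 1 =>
      let j := PySem.Chars.findFrom s ['/', '/'] (pos : Int) none
      if j = -1 then s
      else if pvQuoteCount (s.take j.toNat) % 2 = 0 then s.take j.toNat
      else pvBCut s (j.toNat + 1) fuel

def fmt_mid_comments_alt (s_l : List String) : List String :=
  s_l.map (fun s => String.ofList (pvBCut s.toList 0 (s.toList.length + 1)))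

-- ===== PRECONDITION & SPEC =====
def Spec_fmt_mid_comments (s_l : List String) (out : List String) : Prop := out = fmt_mid_comments_alt s_l
instance (s_l : List String) (out : List String) : Decidable (Spec_fmt_mid_comments s_l out) := by unfold Spec_fmt_mid_comments; infer_instance

-- ===== CLAIM (what is proved, stated in full; the proofs are below) =====
def Claim_equal_fmt_mid_comments : Prop := ∀ (s_l : List String), Dom_fmt_mid_comments s_l → Spec_fmt_mid_comments s_l (fmt_mid_comments s_l)

-- ===== LEMMAS AND PROOFS =====

-- proof-side scan machine: one pass with a lookahead and an in-quote flag
def pvScan : List Char → Bool → List Char → List Char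
  | [], _, acc => acc
  | c :: rest, inq, acc =>
      if inq = false ∧ c = '/' ∧ rest.head? = some '/' then acc
      else pvScan rest (if c = '"' ∨ c = '\'' then !inq else inq) (acc ++ [c])

-- "i is a cut point": "//" starts at i and the quote count before i is even
def pvCutAt (s : List Char) (i : Nat) : Bool :=
  decide (['/', '/'] <+: s.drop i) && decide (pvQuoteCount (s.take i) % 2 = 0)

-- first cut point ≥ k (proof-side reference function)
def pvFC (s : List Char) (k : Nat) : Option Nat :=
  if _h : k < s.length then
    if pvCutAt s k then some k else pvFC s (k + 1)
  else none
termination_by s.length - k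

def pvFCRes (s : List Char) (k : Nat) : List Char :=
  match pvFC s k with
  | some i => s.take i
  | none => s

-- A's prev-based break and the scan machine's lookahead break coincide.
theorem pvALine_eq_pvScan (ns : List Char) :
    ∀ (acc : List Char) (inq : Bool) (prev : List Char),
    pvALine ns acc inq prev =
      if prev = ['/'] ∧ inq = false ∧ ns.head? = some '/' then acc.dropLast
      else pvScan ns inq acc := by
  induction ns with
  | nil => intro acc inq prev; simp [pvALine, pvScan]
  | cons cur rest ih =>
    intro acc inq prev
    rw [pvALine, ih]
    by_cases hc : cur = '/'
    · subst hc
      by_cases hq : inq = false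
      · subst hq
        by_cases hp : prev = ['/'] <;>
          by_cases hr : rest.head? = some '/' <;>
          simp [hp, hr, pvScan]
      · have hq' : inq = true := by revert hq; cases inq <;> simp
        subst hq'
        simp [pvScan]
    · simp [hc, pvScan]

theorem pair_prefix_cons (c : Char) (r : List Char) :
    (['/', '/'] <+: c :: r) ↔ (c = '/' ∧ r.head? = some '/') := by
  cases r with
  | nil =>
    constructor
    · intro h; have := h.length_le; simp at this
    · rintro ⟨_, h⟩; simp at h
  | cons d r' =>
    constructor
    · intro h
      rw [List.cons_prefix_cons] at h
      obtain ⟨h1, h2⟩ := h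
      rw [List.cons_prefix_cons] at h2
      exact ⟨h1.symm, by simp [h2.1.symm]⟩
    · rintro ⟨h1, h2⟩
      simp at h2
      subst h1; subst h2
      simp [List.cons_prefix_cons]

theorem pvQuoteCount_snoc (acc : List Char) (c : Char) :
    pvQuoteCount (acc ++ [c])
      = pvQuoteCount acc + (if c = '"' ∨ c = '\'' then 1 else 0) := by
  by_cases h1 : c = '"'
  · subst h1; simp [pvQuoteCount, List.count_append]; omega
  · by_cases h2 : c = '\''
    · subst h2; simp [pvQuoteCount, List.count_append]; omega
    · simp [pvQuoteCount, List.count_append, h1, h2]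

theorem pvFC_ge_len (s : List Char) (k : Nat) (h : ¬ k < s.length) :
    pvFC s k = none := by
  rw [pvFC, dif_neg h]

-- the scan machine computes the first-cut-point result
theorem pvScan_eq_fc (rest : List Char) :
    ∀ (acc : List Char) (inq : Bool),
    inq = decide (pvQuoteCount acc % 2 = 1) →
    pvScan rest inq acc = pvFCRes (acc ++ rest) acc.length := by
  induction rest with
  | nil =>
    intro acc inq _
    have h : pvFC acc acc.length = none := pvFC_ge_len _ _ (by omega)
    simp [pvScan, pvFCRes, h]
  | cons c r ih =>
    intro acc inq hinq
    have hk : acc.length < (acc ++ c :: r).length := by simp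
    have hdrop : (acc ++ c :: r).drop acc.length = c :: r := List.drop_left
    have htake : (acc ++ c :: r).take acc.length = acc := List.take_left
    have hcut : pvCutAt (acc ++ c :: r) acc.length
        = (decide (c = '/' ∧ r.head? = some '/') && decide (pvQuoteCount acc % 2 = 0)) := by
      simp only [pvCutAt, hdrop, htake, pair_prefix_cons]
    rw [pvScan]
    by_cases hb : inq = false ∧ c = '/' ∧ r.head? = some '/'
    · obtain ⟨h0, h1, h2⟩ := hb
      have heven : pvQuoteCount acc % 2 = 0 := by
        rw [h0] at hinq; have := hinq.symm; simp at this; omega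
      have : pvCutAt (acc ++ c :: r) acc.length = true := by
        rw [hcut]; simp [h1, h2, heven]
      rw [if_pos ⟨h0, h1, h2⟩]
      unfold pvFCRes
      rw [pvFC, dif_pos hk, if_pos this]
      exact htake.symm
    · have hcutf : pvCutAt (acc ++ c :: r) acc.length = false := by
        rw [hcut]
        by_cases h1 : c = '/' ∧ r.head? = some '/'
        · have h0 : ¬ inq = false := fun h => hb ⟨h, h1⟩
          have : inq = true := by revert h0; cases inq <;> simp
          rw [this] at hinq
          have hodd : pvQuoteCount acc % 2 = 1 := by
            have := hinq.symm; simpa using this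
          simp [hodd]
        · simp [h1]
      rw [if_neg hb]
      have hinq' : (if c = '"' ∨ c = '\'' then !inq else inq)
          = decide (pvQuoteCount (acc ++ [c]) % 2 = 1) := by
        rw [pvQuoteCount_snoc]
        by_cases hq : c = '"' ∨ c = '\''
        · rw [if_pos hq, if_pos hq, hinq]
          rcases Nat.mod_two_eq_zero_or_one (pvQuoteCount acc) with h | h <;>
            simp [h, Nat.add_mod]
        · rw [if_neg hq, if_neg hq, hinq]; simp
      have := ih (acc ++ [c]) _ hinq'
      rw [this]
      unfold pvFCRes
      conv_rhs => rw [pvFC]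
      rw [dif_pos hk, if_neg (by simp [hcutf])]
      have harr : acc ++ [c] ++ r = acc ++ c :: r := by simp
      have hlen : (acc ++ [c]).length = acc.length + 1 := by simp
      rw [harr, hlen]

theorem pvFC_none_of_no_pair (s : List Char) (k : Nat)
    (h : ¬ ['/', '/'] <:+: s.drop k) : pvFC s k = none := by
  revert h
  refine pvFC.induct s (fun k => ¬ ['/', '/'] <:+: s.drop k → pvFC s k = none)
    ?_ ?_ ?_ k
  · intro x _ hcut h
    exfalso
    simp only [pvCutAt, Bool.and_eq_true, decide_eq_true_eq] at hcut
    exact h hcut.1.isInfix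
  · intro x hx hcut ih h
    rw [pvFC, dif_pos hx, if_neg hcut]
    apply ih
    intro hinf
    apply h
    have hsuf : s.drop (x + 1) <:+ s.drop x := by
      have h1 : (s.drop x).drop 1 = s.drop (x + 1) := by
        rw [List.drop_drop, Nat.add_comm]
      rw [← h1]
      exact List.drop_suffix _ _
    exact hinf.trans hsuf.isInfix
  · intro x hx _
    exact pvFC_ge_len s x hx

theorem pvFC_congr (s : List Char) (j : Nat) :
    ∀ (k : Nat), k ≤ j → (∀ i, k ≤ i → i < j → ¬ ['/', '/'] <+: s.drop i) →
    pvFC s k = pvFC s j := by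
  have H : ∀ (d k : Nat), j - k = d → k ≤ j →
      (∀ i, k ≤ i → i < j → ¬ ['/', '/'] <+: s.drop i) → pvFC s k = pvFC s j := by
    intro d
    induction d with
    | zero =>
      intro k hd hk _
      have hkj : k = j := by omega
      rw [hkj]
    | succ n ihn =>
      intro k hd hk hmin
      have hkj : k < j := by omega
      by_cases hlen : k < s.length
      · have hcutf : pvCutAt s k = false := by
          simp only [pvCutAt, Bool.and_eq_false_iff]
          left; simp [hmin k (le_refl k) hkj]
        rw [pvFC, dif_pos hlen, if_neg (by simp [hcutf])]
        exact ihn (k + 1) (by omega) (by omega)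
          (fun i hi1 hi2 => hmin i (by omega) hi2)
      · rw [pvFC_ge_len s k hlen, pvFC_ge_len s j (by omega)]
  intro k hk hmin
  exact H (j - k) k rfl hk hmin

-- B's find/count jump loop computes the first-cut-point result
theorem pvBCut_eq_fc (s : List Char) :
    ∀ (fuel pos : Nat), pos ≤ s.length → s.length - pos < fuel →
    pvBCut s pos fuel = pvFCRes s pos := by
  intro fuel
  induction fuel with
  | zero => intro pos _ h; omega
  | succ n ih =>
    intro pos hpos hfuel
    rw [pvBCut]
    by_cases hj : PySem.Chars.findFrom s ['/', '/'] (pos : Int) none = -1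
    · rw [if_pos hj]
      have hno := (PySem.Chars.findFrom_natCast_eq_neg_one_iff s ['/', '/'] pos hpos).mp hj
      unfold pvFCRes
      rw [pvFC_none_of_no_pair s pos hno]
    · rw [if_neg hj]
      obtain ⟨hle, hpre, hmin⟩ :=
        PySem.Chars.findFrom_natCast_spec s ['/', '/'] pos hpos hj
      set j := PySem.Chars.findFrom s ['/', '/'] (pos : Int) none with hjdef
      have hj0 : 0 ≤ j := le_trans (by exact_mod_cast Int.natCast_nonneg pos) hle
      have hposle : pos ≤ j.toNat := by omega
      have hlen2 : 2 + j.toNat ≤ s.length := by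
        have := hpre.length_le
        simp at this
        omega
      have hfc : pvFC s pos = pvFC s j.toNat := pvFC_congr s j.toNat pos hposle hmin
      by_cases hpar : pvQuoteCount (s.take j.toNat) % 2 = 0
      · rw [if_pos hpar]
        have hcut : pvCutAt s j.toNat = true := by
          simp [pvCutAt, hpre, hpar]
        unfold pvFCRes
        rw [hfc, pvFC, dif_pos (by omega), if_pos hcut]
      · rw [if_neg hpar]
        have hcut : pvCutAt s j.toNat = false := by
          simp [pvCutAt, hpar]
        have step : pvFC s j.toNat = pvFC s (j.toNat + 1) := by
          rw [pvFC, dif_pos (by omega), if_neg (by simp [hcut])]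
        have := ih (j.toNat + 1) (by omega) (by omega)
        rw [this]
        unfold pvFCRes
        rw [hfc, step]

-- ===== VERDICT (by name: the statement is the Claim_ definition above) =====
theorem fmt_mid_comments_spec : Claim_equal_fmt_mid_comments := by
  intro s_l _
  unfold Spec_fmt_mid_comments fmt_mid_comments fmt_mid_comments_alt
  apply List.map_congr_left
  intro s _
  have hB : pvBCut s.toList 0 (s.toList.length + 1) = pvFCRes s.toList 0 :=
    pvBCut_eq_fc s.toList (s.toList.length + 1) 0 (by omega) (by omega)
  by_cases h : PySem.Str.isIn "//" s = true
  · rw [if_pos h, hB]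
    congr 1
    rw [pvALine_eq_pvScan]
    simp only [List.head?]
    rw [if_neg (by simp)]
    have := pvScan_eq_fc s.toList [] false (by simp [pvQuoteCount])
    simpa using this
  · rw [if_neg h, hB]
    have h' : PySem.Chars.isIn "//".toList s.toList = false := by
      have hb := Bool.eq_false_iff.mpr h
      simpa using hb
    have hno := (PySem.Chars.isIn_eq_false_iff _ _).mp h'
    have : pvFC s.toList 0 = none := by
      apply pvFC_none_of_no_pair
      simpa using hno
    rw [pvFCRes, this]
    exact String.ofList_toList.symm
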